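-- pv_equiv track=rewrite | github.com/Ayaxita/AgroGuard | meadow-be/App/e_breed/views.py | move_state_one_to_end
-- ===== SOURCE A (Python) =====
-- def move_state_one_to_end(data_list):
--     state_one_list = []
--     other_list = []
--     for data in data_list:
--         if data.get('state') == 1:  # 使用 get 方法避免键不存在时引发错误
--             state_one_list.append(data)
--         else:
--             other_list.append(data)
--     other_list.extend(state_one_list)  # 将 state 为 1 的列表添加到其他列表的后面
--     return other_list
-- ===== SOURCE B (Python) =====
-- def move_state_one_to_end(data_list):
--     # Stable sort on the boolean key: non-state-1 items (False) first, state-1 items (True) last.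
--     return sorted(data_list, key=lambda d: d.get('state') == 1)
-- ===== Notes on version B (the rewrite author's own statement) =====
-- stated objective: idiomatic
-- what changed: Replaces the two-bucket partition loop with a single stable sorted() call keyed on the boolean d.get('state') == 1, so the stable sort itself places non-state-1 items first and state-1 items last.
import Mathlib
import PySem

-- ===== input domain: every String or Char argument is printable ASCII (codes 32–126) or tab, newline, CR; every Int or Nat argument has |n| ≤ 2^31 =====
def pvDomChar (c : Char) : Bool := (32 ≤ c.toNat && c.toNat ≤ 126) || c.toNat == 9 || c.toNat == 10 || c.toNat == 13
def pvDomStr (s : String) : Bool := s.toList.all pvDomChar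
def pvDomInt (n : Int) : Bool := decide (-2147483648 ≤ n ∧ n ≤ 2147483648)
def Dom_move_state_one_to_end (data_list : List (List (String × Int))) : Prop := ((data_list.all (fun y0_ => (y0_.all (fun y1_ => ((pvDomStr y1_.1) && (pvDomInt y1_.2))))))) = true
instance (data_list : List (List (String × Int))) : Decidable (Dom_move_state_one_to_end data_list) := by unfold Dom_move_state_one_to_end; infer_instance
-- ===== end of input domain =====

-- B replaces A's two-bucket partition loop with one stable sorted() call on the boolean key
-- d.get('state') == 1 (more idiomatic; not faster).

-- ===== PORT A =====
-- d.get('state') == 1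
def pvIsOne (d : List (String × Int)) : Bool := (PySem.Dict.mk d).get? "state" == some (1 : Int)

def move_state_one_to_end (data_list : List (List (String × Int))) : List (List (String × Int)) :=
  let r := data_list.foldl
    (fun (acc : List (List (String × Int)) × List (List (String × Int))) d =>
      if pvIsOne d then (acc.1 ++ [d], acc.2) else (acc.1, acc.2 ++ [d]))
    ([], [])
  r.2 ++ r.1

-- ===== PORT B =====
-- key=lambda d: d.get('state') == 1  (Python bool sorts as 0/1)
def pvKey (d : List (String × Int)) : Int := if pvIsOne d then 1 else 0

def move_state_one_to_end_alt (data_list : List (List (String × Int))) : List (List (String × Int)) :=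
  PySem.List.sorted data_list pvKey

-- ===== PRECONDITION & SPEC =====
def Spec_move_state_one_to_end (data_list : List (List (String × Int))) (out : List (List (String × Int))) : Prop := out = move_state_one_to_end_alt data_list
instance (data_list : List (List (String × Int))) (out : List (List (String × Int))) : Decidable (Spec_move_state_one_to_end data_list out) := by unfold Spec_move_state_one_to_end; infer_instance

-- ===== CLAIM (what is proved, stated in full; the proofs are below) =====
def Claim_equal_move_state_one_to_end : Prop := ∀ (data_list : List (List (String × Int))), Dom_move_state_one_to_end data_list → Spec_move_state_one_to_end data_list (move_state_one_to_end data_list)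

-- ===== LEMMAS AND PROOFS =====

-- A's partition loop, characterised by filters.
theorem pvA_foldl (l : List (List (String × Int)))
    (p q : List (List (String × Int))) :
    l.foldl (fun (acc : List (List (String × Int)) × List (List (String × Int))) d =>
        if pvIsOne d then (acc.1 ++ [d], acc.2) else (acc.1, acc.2 ++ [d])) (p, q)
      = (p ++ l.filter (fun d => pvIsOne d), q ++ l.filter (fun d => !pvIsOne d)) := by
  induction l generalizing p q with
  | nil => simp
  | cons x l ih =>
    by_cases hx : pvIsOne x = true <;>
      simp [hx, ih, List.append_assoc]

-- Inserting a key-0 element into zeros ++ ones lands right after the zeros.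
theorem pvInsert_zero (x : List (String × Int)) (hx : pvIsOne x = false)
    (A B : List (List (String × Int)))
    (hA : ∀ a ∈ A, pvIsOne a = false) (hB : ∀ b ∈ B, pvIsOne b = true) :
    PySem.List.insertBy (fun a b => decide (pvKey a < pvKey b)) x (A ++ B)
      = A ++ x :: B := by
  induction A with
  | nil =>
    cases B with
    | nil => simp [PySem.List.insertBy]
    | cons b B' =>
      have hb := hB b (by simp)
      simp [PySem.List.insertBy, pvKey, hx, hb]
  | cons a A' ih =>
    have ha := hA a (by simp)
    have h2 := ih (fun a ha' => hA a (by simp [ha']))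
    have hba : decide (pvKey x < pvKey a) = false := by simp [pvKey, hx, ha]
    simp [PySem.List.insertBy, hba, h2]

-- Inserting a key-1 element lands at the very end.
theorem pvInsert_one (x : List (String × Int)) (hx : pvIsOne x = true)
    (l : List (List (String × Int))) :
    PySem.List.insertBy (fun a b => decide (pvKey a < pvKey b)) x l = l ++ [x] := by
  apply PySem.List.insertBy_of_forall_not_before
  intro y _
  simp only [pvKey, hx, if_true]
  by_cases hy : pvIsOne y = true <;> simp [hy]

-- The stable insertion-sort loop keeps "zeros ++ ones", stably.
theorem pvB_foldl (l : List (List (String × Int)))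
    (A B : List (List (String × Int)))
    (hA : ∀ a ∈ A, pvIsOne a = false) (hB : ∀ b ∈ B, pvIsOne b = true) :
    l.foldl (fun acc x => PySem.List.insertBy (fun a b => decide (pvKey a < pvKey b)) x acc)
        (A ++ B)
      = (A ++ l.filter (fun d => !pvIsOne d)) ++ (B ++ l.filter (fun d => pvIsOne d)) := by
  induction l generalizing A B with
  | nil => simp
  | cons x l ih =>
    by_cases hx : pvIsOne x = true
    · have h1 : PySem.List.insertBy (fun a b => decide (pvKey a < pvKey b)) x (A ++ B)
          = A ++ (B ++ [x]) := by
        rw [pvInsert_one x hx]; simp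
      have := ih A (B ++ [x]) hA (by
        intro b hb
        rcases List.mem_append.mp hb with h | h
        · exact hB b h
        · simp at h; simpa [h] using hx)
      simp only [List.foldl_cons, h1, this]
      simp [hx, List.append_assoc]
    · have hx' : pvIsOne x = false := by simpa using hx
      have h1 : PySem.List.insertBy (fun a b => decide (pvKey a < pvKey b)) x (A ++ B)
          = (A ++ [x]) ++ B := by
        rw [pvInsert_zero x hx' A B hA hB]; simp
      have := ih (A ++ [x]) B (by
        intro a ha
        rcases List.mem_append.mp ha with h | h
        · exact hA a h
        · simp at h; simpa [h] using hx') hB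
      simp only [List.foldl_cons, h1, this]
      simp [hx', List.append_assoc]

-- ===== VERDICT (by name: the statement is the Claim_ definition above) =====
theorem move_state_one_to_end_spec : Claim_equal_move_state_one_to_end := by
  intro data_list _
  unfold Spec_move_state_one_to_end move_state_one_to_end move_state_one_to_end_alt
  rw [PySem.List.sorted_eq_foldl_insertBy]
  have hB := pvB_foldl data_list [] [] (by simp) (by simp)
  simp only [List.nil_append] at hB
  rw [hB, pvA_foldl data_list [] []]
  simp
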